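-- pv_equiv track=rewrite | github.com/gurfinkel/codeSignal | tournaments/differentValues/differentValues.py | differentValues
-- ===== SOURCE A (Python) =====
-- def differentValues(a, d):
--     result = -1
--
--     for i in range(len(a)):
--         for j in range(i + 1, len(a)):
--             diff = abs(a[j] - a[i])
--             if 0 <= d - diff and d - diff <= d - result:
--                 result = diff
--
--     return result
-- ===== SOURCE B (Python) =====
-- def differentValues(a, d):
--     # Sort once, then sweep with two pointers: for each j the best partner
--     # within d is the leftmost element not smaller than s[j] - d.
--     s = sorted(a)
--     best = -1
--     lo = 0
--     for j in range(1, len(s)):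
--         while lo < j and s[j] - s[lo] > d:
--             lo += 1
--         if lo < j:
--             if s[j] - s[lo] > best:
--                 best = s[j] - s[lo]
--     return best
-- ===== Notes on version B (the rewrite author's own statement) =====
-- stated objective: faster
-- what changed: Replaces the all-pairs double loop with sort followed by a single two-pointer sweep that, for each element, takes the farthest partner within d.
import Mathlib
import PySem

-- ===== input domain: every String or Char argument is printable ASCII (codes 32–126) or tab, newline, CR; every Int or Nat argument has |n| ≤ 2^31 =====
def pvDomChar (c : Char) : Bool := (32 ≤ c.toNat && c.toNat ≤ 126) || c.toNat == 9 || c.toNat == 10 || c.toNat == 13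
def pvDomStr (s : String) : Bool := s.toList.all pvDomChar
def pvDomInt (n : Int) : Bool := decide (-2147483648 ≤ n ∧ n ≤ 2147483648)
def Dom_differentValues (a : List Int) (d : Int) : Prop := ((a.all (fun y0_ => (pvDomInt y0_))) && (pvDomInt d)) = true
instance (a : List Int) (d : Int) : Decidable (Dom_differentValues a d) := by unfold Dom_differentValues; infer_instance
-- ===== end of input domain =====

-- B replaces A's all-pairs double loop by sorting once and doing a single two-pointer sweep.

-- ===== PORT A =====
def differentValues (a : List Int) (d : Int) : Int :=
  (PySem.List.pyRange 0 (a.length : Int) 1).foldl (fun result i =>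
    (PySem.List.pyRange (i + 1) (a.length : Int) 1).foldl (fun result j =>
      let diff := |PySem.List.pyGetD a j 0 - PySem.List.pyGetD a i 0|
      if 0 ≤ d - diff ∧ d - diff ≤ d - result then diff else result) result) (-1)

-- ===== PORT B =====
-- the inner `while lo < j and s[j] - s[lo] > d: lo += 1` loop of Source B
def altAdvance (s : List Int) (d : Int) (j : Int) (lo : Int) : Int :=
  if h : lo < j ∧ PySem.List.pyGetD s j 0 - PySem.List.pyGetD s lo 0 > d then
    altAdvance s d j (lo + 1)
  else lo
termination_by (j - lo).toNat
decreasing_by omega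

def differentValues_alt (a : List Int) (d : Int) : Int :=
  let s := PySem.List.sorted a (fun x => x)
  ((PySem.List.pyRange 1 (s.length : Int) 1).foldl (fun (st : Int × Int) j =>
      let lo := altAdvance s d j st.2
      if lo < j ∧ PySem.List.pyGetD s j 0 - PySem.List.pyGetD s lo 0 > st.1 then
        (PySem.List.pyGetD s j 0 - PySem.List.pyGetD s lo 0, lo)
      else (st.1, lo)) ((-1 : Int), (0 : Int))).1

-- ===== PRECONDITION & SPEC =====
def Spec_differentValues (a : List Int) (d : Int) (out : Int) : Prop := out = differentValues_alt a d
instance (a : List Int) (d : Int) (out : Int) : Decidable (Spec_differentValues a d out) := by unfold Spec_differentValues; infer_instance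

-- ===== CLAIM (what is proved, stated in full; the proofs are below) =====
def Claim_equal_differentValues : Prop := ∀ (a : List Int) (d : Int), Dom_differentValues a d → Spec_differentValues a d (differentValues a d)

-- ===== LEMMAS AND PROOFS =====

-- all ordered pairs (earlier element, later element) of a list
def pvPairs : List Int → List (Int × Int)
  | [] => []
  | x :: t => t.map (fun y => (x, y)) ++ pvPairs t

def pvDif (p : Int × Int) : Int := |p.2 - p.1|

-- the accumulator step both programs amount to: keep the max of the diffs that are ≤ d
def pvStep (d r v : Int) : Int := if v ≤ d then max r v else r

def pvF (d : Int) (l : List Int) : Int := ((pvPairs l).map pvDif).foldl (pvStep d) (-1)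

-- B's loop body, named (differentValues_alt's fold is literally this function)
def pvBStep (s : List Int) (d : Int) (st : Int × Int) (j : Int) : Int × Int :=
  let lo := altAdvance s d j st.2
  if lo < j ∧ PySem.List.pyGetD s j 0 - PySem.List.pyGetD s lo 0 > st.1 then
    (PySem.List.pyGetD s j 0 - PySem.List.pyGetD s lo 0, lo)
  else (st.1, lo)

lemma pvStep_rightComm (d : Int) : RightCommutative (pvStep d) := by
  constructor
  intro b a a'
  unfold pvStep
  split_ifs <;> omega

lemma fold_step_perm {L L' : List Int} (d r : Int) (h : L.Perm L') :
    L.foldl (pvStep d) r = L'.foldl (pvStep d) r :=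
  @List.Perm.foldl_eq _ _ (pvStep d) _ _ (pvStep_rightComm d) h r

lemma fold_step_gt (d : Int) (L : List Int) (r : Int) (h : ∀ x ∈ L, d < x) :
    L.foldl (pvStep d) r = r := by
  induction L generalizing r with
  | nil => rfl
  | cons x t ih =>
    have hx := h x (by simp)
    simp only [List.foldl_cons, pvStep, if_neg (by omega : ¬ x ≤ d)]
    exact ih r (fun y hy => h y (by simp [hy]))

lemma fold_step_le_acc (d : Int) (L : List Int) : ∀ r, (∀ x ∈ L, x ≤ r) → L.foldl (pvStep d) r = r := by
  induction L with
  | nil => intro r _; rfl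
  | cons x t ih =>
    intro r h
    have hx := h x (by simp)
    have hs : pvStep d r x = r := by unfold pvStep; split_ifs <;> omega
    simp only [List.foldl_cons, hs]
    exact ih r (fun y hy => h y (by simp [hy]))

lemma fold_step_head (d h : Int) (L : List Int) (r : Int)
    (hd : h ≤ d) (hmax : ∀ x ∈ L, x ≤ h) :
    (h :: L).foldl (pvStep d) r = max r h := by
  simp only [List.foldl_cons, pvStep, if_pos hd]
  exact fold_step_le_acc d L (max r h) (fun x hx => le_trans (hmax x hx) (le_max_right r h))

lemma pvPairs_map_perm {l l' : List Int} (h : l.Perm l') :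
    ((pvPairs l).map pvDif).Perm ((pvPairs l').map pvDif) := by
  induction h with
  | nil => exact List.Perm.refl _
  | cons x h ih =>
    simp only [pvPairs, List.map_append, List.map_map]
    exact List.Perm.append (h.map _) ih
  | swap x y t =>
    simp only [pvPairs, List.map_append, List.map_map, List.map_cons, Function.comp_def]
    have hxy : pvDif (y, x) = pvDif (x, y) := by unfold pvDif; exact abs_sub_comm x y
    rw [hxy]
    exact List.Perm.cons _ (List.perm_append_comm_assoc _ _ _)
  | trans _ _ ih1 ih2 => exact ih1.trans ih2

-- appending one element at the end adds the pairs ending there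
lemma pvPairs_snoc (t : List Int) (y : Int) :
    (pvPairs (t ++ [y])).Perm (pvPairs t ++ t.map (fun x => (x, y))) := by
  induction t with
  | nil => simp [pvPairs]
  | cons x t ih =>
    simp only [List.cons_append, pvPairs, List.map_append, List.map_cons, List.map_nil,
      List.append_assoc, List.nil_append]
    refine List.Perm.append_left _ ?_
    refine (List.Perm.cons _ ih).trans ?_
    exact List.perm_middle.symm

lemma pvF_snoc (d : Int) (p : List Int) (y : Int) :
    pvF d (p ++ [y]) = (p.map (fun x => pvDif (x, y))).foldl (pvStep d) (pvF d p) := by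
  unfold pvF
  rw [fold_step_perm d _ (List.Perm.map pvDif (pvPairs_snoc p y))]
  simp only [List.map_append, List.foldl_append, List.map_map, Function.comp_def]

-- ===== A side =====

lemma A_loop (d : Int) (s : List Int) : ∀ r : Int,
    (List.range s.length).foldl
      (fun r i => ((s.drop (i + 1)).foldl (fun result v =>
          if 0 ≤ d - |v - s.getD i 0| ∧ d - |v - s.getD i 0| ≤ d - result
          then |v - s.getD i 0| else result) r))
      r
    = ((pvPairs s).map pvDif).foldl (pvStep d) r := by
  induction s with
  | nil => intro r; rfl
  | cons x t ih =>
    intro r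
    have hinner : ∀ r : Int, t.foldl (fun result v =>
        if 0 ≤ d - |v - x| ∧ d - |v - x| ≤ d - result then |v - x| else result) r
        = (t.map (fun y => pvDif (x, y))).foldl (pvStep d) r := by
      intro r
      rw [List.foldl_map]
      apply PySem.List.foldl_congr_mem
      intro acc v _
      unfold pvStep pvDif
      simp only
      split_ifs <;> omega
    conv_lhs => simp only [List.length_cons, List.range_succ_eq_map, List.foldl_cons,
      List.foldl_map, Nat.succ_eq_add_one, List.drop_succ_cons, List.getD_cons_succ,
      List.getD_cons_zero, List.drop_zero]
    rw [hinner, ih]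
    conv_rhs => simp only [pvPairs, List.map_append, List.foldl_append, List.map_map]
    rfl

lemma A_eq_pvF (a : List Int) (d : Int) : differentValues a d = pvF d a := by
  unfold differentValues pvF
  rw [PySem.List.pyRange_zero_nat, List.foldl_map]
  rw [← A_loop d a (-1)]
  apply PySem.List.foldl_congr_mem
  intro acc k _
  simp only [PySem.List.pyGetD_natCast]
  exact PySem.List.foldl_pyRange_pyGetD' a 0
    (fun result v =>
      if 0 ≤ d - |v - a.getD k 0| ∧ d - |v - a.getD k 0| ≤ d - result
      then |v - a.getD k 0| else result) acc (by positivity : (0 : Int) ≤ (k : Int) + 1)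

-- ===== B side =====

lemma advance_spec (s : List Int) (d : Int) (m : Nat) :
    ∀ fuel lo : Nat, m - lo = fuel → lo ≤ m →
    ∃ lo' : Nat, altAdvance s d (m : Int) (lo : Int) = (lo' : Int) ∧ lo ≤ lo' ∧ lo' ≤ m ∧
      (∀ k, lo ≤ k → k < lo' → d < s.getD m 0 - s.getD k 0) ∧
      (lo' < m → s.getD m 0 - s.getD lo' 0 ≤ d) := by
  intro fuel
  induction fuel with
  | zero =>
    intro lo hf hlo
    have hlm : lo = m := by omega
    rw [altAdvance, dif_neg (by omega)]
    exact ⟨lo, rfl, le_refl _, by omega, fun k h1 h2 => by omega, fun h => by omega⟩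
  | succ f ihf =>
    intro lo hf hlo
    have hlt : lo < m := by omega
    rw [altAdvance]
    by_cases hc : d < PySem.List.pyGetD s (m : Int) 0 - PySem.List.pyGetD s (lo : Int) 0
    · rw [dif_pos ⟨by exact_mod_cast hlt, hc⟩]
      have hcast : ((lo : Int) + 1) = (((lo + 1 : Nat)) : Int) := by omega
      obtain ⟨lo', h1, h2, h3, h4, h5⟩ := ihf (lo + 1) (by omega) (by omega)
      simp only [PySem.List.pyGetD_natCast] at hc
      refine ⟨lo', by rw [hcast]; exact h1, by omega, h3, ?_, h5⟩
      intro k hk1 hk2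
      rcases Nat.eq_or_lt_of_le hk1 with h | h
      · rw [← h]; exact hc
      · exact h4 k (by omega) hk2
    · rw [dif_neg (fun hh => hc hh.2)]
      simp only [PySem.List.pyGetD_natCast, not_lt] at hc
      exact ⟨lo, rfl, le_refl _, hlo, fun k h1 h2 => by omega, fun _ => hc⟩

lemma pvBStep_eval (s : List Int) (d b lo j : Int) :
    pvBStep s d (b, lo) j =
      (if altAdvance s d j lo < j ∧
          PySem.List.pyGetD s j 0 - PySem.List.pyGetD s (altAdvance s d j lo) 0 > b
       then (PySem.List.pyGetD s j 0 - PySem.List.pyGetD s (altAdvance s d j lo) 0,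
             altAdvance s d j lo)
       else (b, altAdvance s d j lo)) := rfl

lemma B_inv (d : Int) (s : List Int) (hp : s.Pairwise (· ≤ ·)) :
    ∀ m : Nat, 1 ≤ m → m ≤ s.length →
    ∃ lo : Nat, ((PySem.List.pyRange 1 (m : Int) 1).foldl (pvBStep s d) (-1, 0))
        = (pvF d (s.take m), (lo : Int)) ∧ lo < m ∧
        (∀ k, k < lo → d < s.getD (m - 1) 0 - s.getD k 0) := by
  have hmono := List.pairwise_iff_getElem.mp hp
  intro m
  induction m with
  | zero => omega
  | succ m ihm =>
    intro _ hm1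
    by_cases hm0 : m = 0
    · subst hm0
      refine ⟨0, ?_, by omega, fun k hk => by omega⟩
      rw [show ((0 : Nat) + 1 : Nat) = (1 : Nat) from rfl]
      rw [PySem.List.pyRange_one_eq_nil (by norm_num)]
      obtain ⟨x, t, hxt⟩ : ∃ x t, s = x :: t := by
        cases s with
        | nil => simp at hm1
        | cons x t => exact ⟨x, t, rfl⟩
      subst hxt
      simp [pvF, pvPairs]
    -- step: m ≥ 1, m + 1 ≤ length
    have hm : m < s.length := by omega
    obtain ⟨lo, hst, hlo, hinv⟩ := ihm (by omega) (by omega)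
    have hy : s.getD m 0 = s[m] := List.getD_eq_getElem s 0 hm
    have hlen : (s.take m).length = m := by simp [List.length_take]; omega
    -- run the inner while loop
    obtain ⟨lo', hadv, hge, hlem, hmid, hstop⟩ :=
      advance_spec s d m (m - lo) lo rfl (by omega)
    -- everything strictly below lo' is farther than d from s[m]
    have hbelow : ∀ k, k < lo' → d < s.getD m 0 - s.getD k 0 := by
      intro k hk
      by_cases hkl : k < lo
      · have h1 := hinv k hkl
        have hm1' : m - 1 < s.length := by omega
        have h2 : s.getD (m - 1) 0 ≤ s.getD m 0 := by
          rw [List.getD_eq_getElem s 0 hm1', List.getD_eq_getElem s 0 hm]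
          exact hmono (m - 1) m hm1' hm (by omega)
        omega
      · exact hmid k (by omega) hk
    -- the new differences contributed by index m are y - x for x in the prefix
    have hmapdif : (s.take m).map (fun x => pvDif (x, s.getD m 0))
        = (s.take m).map (fun x => s.getD m 0 - x) := by
      apply List.map_congr_left
      intro x hx
      obtain ⟨k, hk, hxk⟩ := List.mem_iff_getElem.mp hx
      have hk' : k < m := by rw [hlen] at hk; omega
      have hxle : x ≤ s[m] := by
        rw [← hxk, List.getElem_take]
        exact hmono k m (by omega) hm hk'
      show |s.getD m 0 - x| = s.getD m 0 - x
      rw [hy]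
      exact abs_of_nonneg (by omega)
    -- take (m+1) = take m ++ [s[m]]
    have htk : s.take (m + 1) = s.take m ++ [s.getD m 0] := by
      rw [List.take_add_one, List.getElem?_eq_getElem hm, hy]
      rfl
    -- the fold over the new diffs
    have hnewfold : ∀ b : Int,
        ((s.take m).map (fun x => s.getD m 0 - x)).foldl (pvStep d) b
          = if lo' < m then max b (s.getD m 0 - s.getD lo' 0) else b := by
      intro b
      by_cases hcase : lo' < m
      · rw [if_pos hcase]
        have hsplit : s.take m = (s.take m).take lo' ++ (s.take m).drop lo' :=
          (List.take_append_drop lo' (s.take m)).symm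
        rw [hsplit, List.map_append, List.foldl_append]
        have h1 : (((s.take m).take lo').map (fun x => s.getD m 0 - x)).foldl (pvStep d) b
            = b := by
          apply fold_step_gt
          intro v hv
          obtain ⟨w, hw, hwv⟩ := List.mem_map.mp hv
          obtain ⟨k2, hk2, hwk2⟩ := List.mem_iff_getElem.mp hw
          have hk2' : k2 < lo' := by
            rw [List.length_take, hlen] at hk2; omega
          have hwe : w = s[k2] := by
            rw [← hwk2, List.getElem_take, List.getElem_take]
          have hb := hbelow k2 hk2'
          rw [List.getD_eq_getElem s 0 (by omega : k2 < s.length)] at hb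
          omega
        rw [h1]
        have hdrop : (s.take m).drop lo' = s[lo'] :: (s.take m).drop (lo' + 1) := by
          rw [List.drop_eq_getElem_cons (by omega : lo' < (s.take m).length)]
          congr 1
          exact List.getElem_take
        have hlo'' : s.getD lo' 0 = s[lo'] := List.getD_eq_getElem s 0 (by omega)
        rw [hdrop, List.map_cons, ← hlo'']
        apply fold_step_head
        · exact hstop hcase
        · intro v hv
          obtain ⟨w, hw, hwv⟩ := List.mem_map.mp hv
          obtain ⟨k2, hk2, hwk2⟩ := List.mem_iff_getElem.mp hw
          have hk2l : lo' + 1 + k2 < m := by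
            rw [List.length_drop, hlen] at hk2; omega
          have hwe : w = s[lo' + 1 + k2] := by
            rw [← hwk2, List.getElem_drop, List.getElem_take]
          have hle : s[lo'] ≤ s[lo' + 1 + k2] :=
            hmono lo' (lo' + 1 + k2) (by omega) (by omega) (by omega)
          rw [hlo'']
          omega
      · rw [if_neg hcase]
        apply fold_step_gt
        intro v hv
        obtain ⟨w, hw, hwv⟩ := List.mem_map.mp hv
        obtain ⟨k2, hk2, hwk2⟩ := List.mem_iff_getElem.mp hw
        have hk2' : k2 < lo' := by rw [hlen] at hk2; omega
        have hb := hbelow k2 hk2'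
        have hwe : w = s[k2] := by rw [← hwk2]; exact List.getElem_take
        rw [List.getD_eq_getElem s 0 (by omega : k2 < s.length)] at hb
        omega
    -- the value after one more loop iteration
    have hval : pvF d (s.take (m + 1))
        = if lo' < m then max (pvF d (s.take m)) (s.getD m 0 - s.getD lo' 0)
          else pvF d (s.take m) := by
      rw [htk, pvF_snoc, hmapdif, hnewfold]
    -- unfold one loop iteration
    have hrange : PySem.List.pyRange 1 ((m + 1 : Nat) : Int) 1
        = PySem.List.pyRange 1 (m : Int) 1 ++ [(m : Int)] := by
      rw [show ((m + 1 : Nat) : Int) = (m : Int) + 1 by omega]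
      exact PySem.List.pyRange_one_succ_right (by exact_mod_cast Nat.one_le_iff_ne_zero.mpr hm0)
    refine ⟨lo', ?_, by omega, fun k hk => by simpa using hbelow k hk⟩
    rw [hrange, List.foldl_append, hst]
    simp only [List.foldl_cons, List.foldl_nil]
    rw [pvBStep_eval, hadv]
    simp only [PySem.List.pyGetD_natCast]
    by_cases hcase : lo' < m
    · have hci : ((lo' : Int) < (m : Int)) := by exact_mod_cast hcase
      rw [hval, if_pos hcase]
      by_cases hbig : s.getD m 0 - s.getD lo' 0 > pvF d (s.take m)
      · rw [if_pos ⟨hci, hbig⟩, Prod.mk.injEq]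
        exact ⟨by omega, rfl⟩
      · rw [if_neg (fun hh => hbig hh.2), Prod.mk.injEq]
        exact ⟨by omega, rfl⟩
    · have hci : ¬((lo' : Int) < (m : Int)) := fun hh => hcase (by exact_mod_cast hh)
      rw [hval, if_neg hcase, if_neg (fun hh => hci hh.1)]

lemma B_eq_pvF (a : List Int) (d : Int) :
    differentValues_alt a d = pvF d (PySem.List.sorted a (fun x => x)) := by
  have hB : differentValues_alt a d
      = ((PySem.List.pyRange 1 ((PySem.List.sorted a (fun x => x)).length : Int) 1).foldl
          (pvBStep (PySem.List.sorted a (fun x => x)) d) (-1, 0)).1 := rfl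
  rw [hB]
  set s := PySem.List.sorted a (fun x => x) with hs
  have hp : s.Pairwise (· ≤ ·) := PySem.List.sorted_pairwise a (fun x => x)
  by_cases h0 : s.length = 0
  · rw [h0]
    rw [PySem.List.pyRange_one_eq_nil (by norm_num)]
    rw [List.length_eq_zero_iff.mp h0]
    rfl
  · obtain ⟨lo, hst, _, _⟩ := B_inv d s hp s.length (by omega) (le_refl _)
    rw [hst]
    simp [List.take_length]

-- ===== VERDICT (by name: the statement is the Claim_ definition above) =====
theorem differentValues_spec : Claim_equal_differentValues := by
  intro a d _
  unfold Spec_differentValues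
  rw [A_eq_pvF, B_eq_pvF, pvF, pvF]
  exact fold_step_perm d _ (pvPairs_map_perm (PySem.List.sorted_perm a (fun x => x) false)).symm
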